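-- pv_equiv track=rewrite | github.com/mdowell12/advent-of-code-2023 | solutions/15/run.py | run_hash
-- ===== SOURCE A (Python) =====
-- def run_hash(string):
--     result = 0
--     for char in string:
--         ascii = ord(char)
--         result += ascii
--         result = result * 17
--         result = result % 256
--     return result
-- ===== SOURCE B (Python) =====
-- def run_hash(string):
--     # Polynomial-hash decomposition: result = sum(ord(c_i) * 17^(n-i)) mod 256,
--     # built by a reverse traversal maintaining a running power of 17.
--     result = 0
--     power = 17
--     for char in reversed(string):
--         result = (result + ord(char) * power) % 256
--         power = power * 17 % 256
--     return result
-- ===== Notes on version B (the rewrite author's own statement) =====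
-- stated objective: alternative
-- what changed: Replaces the forward add-then-multiply accumulation with a polynomial hash evaluated over the reversed string, maintaining a separate running power of 17 mod 256 instead of re-multiplying the accumulator.
import Mathlib
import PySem

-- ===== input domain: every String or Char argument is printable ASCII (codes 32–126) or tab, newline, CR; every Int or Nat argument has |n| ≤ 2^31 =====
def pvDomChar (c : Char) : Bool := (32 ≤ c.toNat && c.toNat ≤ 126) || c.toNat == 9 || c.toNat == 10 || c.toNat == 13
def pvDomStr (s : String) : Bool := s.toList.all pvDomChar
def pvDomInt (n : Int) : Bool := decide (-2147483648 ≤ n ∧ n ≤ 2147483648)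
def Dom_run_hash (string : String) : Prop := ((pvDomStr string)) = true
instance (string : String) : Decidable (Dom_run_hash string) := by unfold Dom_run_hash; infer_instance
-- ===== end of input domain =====

-- B re-implements the AoC HASH as a polynomial hash over the reversed string with a
-- running power-of-17 state, instead of A's forward add-then-multiply accumulation
-- (alternative decomposition; same O(n) cost; return value proved equal).

-- ===== PORT A =====
-- for char in string: result = ((result + ord(char)) * 17) % 256
def run_hash (string : String) : Int :=
  string.toList.foldl
    (fun result char => PySem.Int.mod ((result + (char.toNat : Int)) * 17) 256) 0

-- ===== PORT B =====
-- for char in reversed(string): result = (result + ord(char)*power) % 256; power = power*17 % 256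
def run_hash_alt (string : String) : Int :=
  (string.toList.reverse.foldl
    (fun st char =>
      (PySem.Int.mod (st.1 + (char.toNat : Int) * st.2) 256,
       PySem.Int.mod (st.2 * 17) 256))
    ((0 : Int), (17 : Int))).1

-- ===== PRECONDITION & SPEC =====
def Spec_run_hash (string : String) (out : Int) : Prop := out = run_hash_alt string
instance (string : String) (out : Int) : Decidable (Spec_run_hash string out) := by unfold Spec_run_hash; infer_instance

-- ===== CLAIM (what is proved, stated in full; the proofs are below) =====
def Claim_equal_run_hash : Prop := ∀ (string : String), Dom_run_hash string → Spec_run_hash string (run_hash string)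

-- ===== LEMMAS AND PROOFS =====

-- A's step and B's step, over `List Char`, with Python's mod unfolded to `%` (divisor 256 > 0).
def pvStepA (r : Int) (c : Char) : Int := ((r + (c.toNat : Int)) * 17) % 256

def pvStepB (c : Char) (st : Int × Int) : Int × Int :=
  ((st.1 + (c.toNat : Int) * st.2) % 256, st.2 * 17 % 256)

theorem pvMod_eq (a : Int) : PySem.Int.mod a 256 = a % 256 :=
  PySem.Int.mod_eq_emod_of_pos (by norm_num)

theorem pvB_foldr (l : List Char) :
    (l.reverse.foldl
      (fun st char =>
        (PySem.Int.mod (st.1 + (char.toNat : Int) * st.2) 256,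
         PySem.Int.mod (st.2 * 17) 256))
      ((0 : Int), (17 : Int))) = l.foldr pvStepB ((0 : Int), (17 : Int)) := by
  rw [List.foldl_reverse]
  simp only [pvMod_eq]
  rfl

theorem pvPow2 (l : List Char) :
    (l.foldr pvStepB ((0 : Int), (17 : Int))).2 = (17 : Int) ^ (l.length + 1) % 256 := by
  induction l with
  | nil => decide
  | cons c l ih =>
    simp only [List.foldr_cons, pvStepB, List.length_cons, ih]
    conv_rhs => rw [pow_succ, Int.mul_emod]
    norm_num

theorem pvModEq_self (x : Int) : x % 256 ≡ x [ZMOD 256] :=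
  Int.emod_emod_of_dvd x dvd_rfl

theorem pvMain (l : List Char) : ∀ r : Int, 0 ≤ r → r < 256 →
    l.foldl pvStepA r = ((l.foldr pvStepB ((0 : Int), (17 : Int))).1 + r * 17 ^ l.length) % 256 := by
  induction l with
  | nil =>
    intro r h0 h1
    simp only [List.foldl_nil, List.foldr_nil, List.length_nil, pow_zero, mul_one, zero_add]
    omega
  | cons c l ih =>
    intro r h0 h1
    have h256 : (0 : Int) < 256 := by norm_num
    have hr' : 0 ≤ pvStepA r c ∧ pvStepA r c < 256 :=
      ⟨Int.emod_nonneg _ (by norm_num), Int.emod_lt_of_pos _ h256⟩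
    rw [List.foldl_cons, ih _ hr'.1 hr'.2]
    simp only [List.foldr_cons, pvStepB, List.length_cons]
    show _ ≡ _ [ZMOD 256]
    calc (l.foldr pvStepB (0, 17)).1 + pvStepA r c * 17 ^ l.length
        ≡ (l.foldr pvStepB (0, 17)).1 + (r + (c.toNat : Int)) * 17 * 17 ^ l.length [ZMOD 256] :=
          Int.ModEq.add_left _ (Int.ModEq.mul_right _ (pvModEq_self _))
      _ = (l.foldr pvStepB (0, 17)).1 + (c.toNat : Int) * 17 ^ (l.length + 1)
            + r * 17 ^ (l.length + 1) := by ring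
      _ ≡ (l.foldr pvStepB (0, 17)).1 + (c.toNat : Int) * (17 ^ (l.length + 1) % 256)
            + r * 17 ^ (l.length + 1) [ZMOD 256] :=
          Int.ModEq.add_right _ (Int.ModEq.add_left _ (Int.ModEq.mul_left _ (pvModEq_self _).symm))
      _ = (l.foldr pvStepB (0, 17)).1 + (c.toNat : Int) * (l.foldr pvStepB (0, 17)).2
            + r * 17 ^ (l.length + 1) := by rw [pvPow2]
      _ ≡ ((l.foldr pvStepB (0, 17)).1 + (c.toNat : Int) * (l.foldr pvStepB (0, 17)).2) % 256
            + r * 17 ^ (l.length + 1) [ZMOD 256] :=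
          Int.ModEq.add_right _ (pvModEq_self _).symm

-- ===== VERDICT (by name: the statement is the Claim_ definition above) =====
theorem run_hash_spec : Claim_equal_run_hash := by
  intro s _
  unfold Spec_run_hash run_hash run_hash_alt
  rw [pvB_foldr]
  have hA : s.toList.foldl
      (fun result char => PySem.Int.mod ((result + (char.toNat : Int)) * 17) 256) 0
      = s.toList.foldl pvStepA 0 := by
    simp only [pvMod_eq]; rfl
  rw [hA, pvMain s.toList 0 le_rfl (by norm_num)]
  have h1 : 0 ≤ (s.toList.foldr pvStepB ((0:Int), (17:Int))).1 ∧
      (s.toList.foldr pvStepB ((0:Int), (17:Int))).1 < 256 := by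
    cases s.toList with
    | nil => decide
    | cons c l =>
      simp only [List.foldr_cons, pvStepB]
      exact ⟨Int.emod_nonneg _ (by norm_num), Int.emod_lt_of_pos _ (by norm_num)⟩
  simp only [zero_mul, add_zero]
  omega
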